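-- pv_equiv track=rewrite | github.com/miliar/Code_Jam_Webscraper | Solutions_python/Problem_203/284.py | complete_cake
-- ===== SOURCE A (Python) =====
-- def transpose(matrix):
--     return [list(row) for row in zip(*matrix)]
--
-- def complete_cake(cake):
--     for direction in range(2):
--         for row in cake:
--             for index in range(len(row)):
--                 if index > 0 and row[index] == '?' and row[index-1] != '?':
--                     copy_character_right(row, index-1)
--                 if index < len(row) - 1 and row[index] == '?' and row[index+1] != '?':
--                     copy_character_left(row, index+1)
--
--         cake = transpose(cake)
--
--     return cake
--
-- def copy_character_right(row, index):
--     while index < len(row) - 1 and row[index+1] == '?':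
--         row[index+1] = row[index]
--         index += 1
--
-- def copy_character_left(row, index):
--     while index > 0 and row[index-1] == '?':
--         row[index-1] = row[index]
--         index -= 1
-- ===== SOURCE B (Python) =====
-- # B: per row, one forward sweep (fill '?' from last letter seen) plus one backward
-- # sweep (fill the remaining leading '?' run from the first letter on the right);
-- # applied to rows, then to columns via the same zip-transpose. Equivalence is about
-- # the RETURN value only: A mutates the input rows in place, B does not.
--
-- def transpose(matrix):
--     return [list(row) for row in zip(*matrix)]
--
-- def fill(row):
--     out = []
--     last = None
--     for ch in row:
--         if ch != '?':
--             last = ch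
--             out.append(ch)
--         else:
--             out.append(last if last is not None else '?')
--     res = []
--     nxt = None
--     for ch in reversed(out):
--         if ch != '?':
--             nxt = ch
--             res.append(ch)
--         else:
--             res.append(nxt if nxt is not None else '?')
--     return res[::-1]
--
-- def complete_cake(cake):
--     step = transpose([fill(r) for r in cake])
--     return transpose([fill(c) for c in step])
-- ===== Notes on version B (the rewrite author's own statement) =====
-- stated objective: simpler
-- what changed: A detects run boundaries inside each row pass and propagates characters with inner while-loops (copy_character_right/left); B fills each row with one forward sweep remembering the last letter seen plus one backward sweep for the leading '?' run, applied to rows then to columns via the same zip-transpose. Equivalence is about the return value only: A mutates the input rows in place, B does not.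
import Mathlib
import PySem

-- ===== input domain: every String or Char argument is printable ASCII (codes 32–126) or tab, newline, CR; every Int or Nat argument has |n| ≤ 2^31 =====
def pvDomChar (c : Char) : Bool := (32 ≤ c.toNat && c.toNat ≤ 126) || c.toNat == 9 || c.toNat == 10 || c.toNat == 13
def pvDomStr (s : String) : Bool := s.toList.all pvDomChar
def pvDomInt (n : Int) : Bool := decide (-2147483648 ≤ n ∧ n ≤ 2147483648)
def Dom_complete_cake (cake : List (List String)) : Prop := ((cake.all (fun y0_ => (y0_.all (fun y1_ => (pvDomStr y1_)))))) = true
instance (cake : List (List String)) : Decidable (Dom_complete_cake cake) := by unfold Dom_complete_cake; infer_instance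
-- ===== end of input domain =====

-- B replaces A's boundary-detection with run-copying inner while-loops by two
-- accumulator-carrying linear sweeps per row (simpler decomposition, same cost).
-- Equivalence is about the RETURN value only: Python A mutates the input rows in
-- place during its horizontal pass, B does not.

-- ===== PORT A =====
-- while index < len(row)-1 and row[index+1]=='?': row[index+1]=row[index]; index+=1
def copyRightA (r : List String) (i : Nat) : List String :=
  if h : i < r.length - 1 ∧ r.getD (i + 1) "" = "?" then
    copyRightA (r.set (i + 1) (r.getD i "")) (i + 1)
  else r
termination_by r.length - i
decreasing_by simp [List.length_set]; omega

-- while index > 0 and row[index-1]=='?': row[index-1]=row[index]; index-=1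
def copyLeftA (r : List String) (i : Nat) : List String :=
  if h : 0 < i ∧ r.getD (i - 1) "" = "?" then
    copyLeftA (r.set (i - 1) (r.getD i "")) (i - 1)
  else r
termination_by i

-- body of 'for index in range(len(row))'
def stepA (r : List String) (idx : Nat) : List String :=
  let r1 := if 0 < idx ∧ r.getD idx "" = "?" ∧ r.getD (idx - 1) "" ≠ "?" then copyRightA r (idx - 1) else r
  if idx < r1.length - 1 ∧ r1.getD idx "" = "?" ∧ r1.getD (idx + 1) "" ≠ "?" then copyLeftA r1 (idx + 1) else r1

def rowPassA (row : List String) : List String :=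
  (List.range row.length).foldl stepA row

-- transpose(matrix) = [list(row) for row in zip(*matrix)]  (zip truncates to the shortest row)
def transposePy (m : List (List String)) : List (List String) :=
  match m with
  | [] => []
  | r :: rs =>
    let n := rs.foldl (fun a q => min a q.length) r.length
    (List.range n).map (fun j => (r :: rs).map (fun q => q.getD j ""))

def complete_cake (cake : List (List String)) : List (List String) :=
  (List.range 2).foldl (fun c _ => transposePy (c.map rowPassA)) cake

-- ===== PORT B =====
-- forward sweep of Source B's fill: remember the last non-'?' character
def fwdGo : Option String → List String → List String
  | _, [] => []
  | last, ch :: t => if ch ≠ "?" then ch :: fwdGo (some ch) t else (last.getD "?") :: fwdGo last t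

-- backward sweep (runs over the reversed list, result is reversed at the end)
def bwdGo : Option String → List String → List String
  | _, [] => []
  | nxt, ch :: t => if ch ≠ "?" then ch :: bwdGo (some ch) t else (nxt.getD "?") :: bwdGo nxt t

def fillB (row : List String) : List String :=
  (bwdGo none ((fwdGo none row).reverse)).reverse

def complete_cake_alt (cake : List (List String)) : List (List String) :=
  transposePy ((transposePy (cake.map fillB)).map fillB)

-- ===== PRECONDITION & SPEC =====
def Spec_complete_cake (cake : List (List String)) (out : List (List String)) : Prop := out = complete_cake_alt cake
instance (cake : List (List String)) (out : List (List String)) : Decidable (Spec_complete_cake cake out) := by unfold Spec_complete_cake; infer_instance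

-- ===== CLAIM (what is proved, stated in full; the proofs are below) =====
def Claim_equal_complete_cake : Prop := ∀ (cake : List (List String)), Dom_complete_cake cake → Spec_complete_cake cake (complete_cake cake)

-- ===== LEMMAS AND PROOFS =====

theorem copyRight_run (k : Nat) (u t' : List String) (c : String) (hc : c ≠ "?")
    (ht : t' = [] ∨ t'.getD 0 "" ≠ "?") :
    copyRightA (u ++ c :: List.replicate k "?" ++ t') u.length
      = u ++ c :: List.replicate k c ++ t' := by
  induction k generalizing u with
  | zero =>
    rw [copyRightA]
    rw [dif_neg]
    · simp
    rcases ht with h | h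
    · subst h; simp
    · intro ⟨h1, h2⟩
      rw [List.getD_append_right] at h2
      · simp at h2; exact h (h2 ▸ rfl)
      · simp
  | succ k ih =>
    rw [copyRightA]
    rw [dif_pos]
    · have hset : ((u ++ c :: List.replicate (k+1) "?" ++ t').set (u.length + 1)
          ((u ++ c :: List.replicate (k+1) "?" ++ t').getD u.length "")) =
          (u ++ [c]) ++ c :: List.replicate k "?" ++ t' := by
        have hg : (u ++ c :: List.replicate (k+1) "?" ++ t').getD u.length "" = c := by
          rw [List.append_assoc, List.getD_append_right _ _ _ _ (le_refl _)]
          simp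
        rw [hg, List.append_assoc, List.set_append]
        simp [List.replicate_succ]
      have := ih (u ++ [c])
      simp only [List.length_append, List.length_cons, List.length_nil] at this ⊢
      rw [hset]
      have h2 := this
      simp at h2 ⊢
      rw [h2]
      simp [List.replicate_succ]
    constructor
    · rcases ht with h | h <;> simp [h, List.replicate_succ] <;> omega
    · rw [List.append_assoc, List.getD_append_right _ _ _ _ (by simp)]
      simp [List.replicate_succ]

theorem copyLeft_run (a : Nat) (t : List String) (c : String) (hc : c ≠ "?") :
    copyLeftA (List.replicate a "?" ++ c :: t) a = List.replicate a c ++ c :: t := by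
  induction a generalizing t with
  | zero => rw [copyLeftA, dif_neg] <;> simp
  | succ a ih =>
    rw [copyLeftA, dif_pos]
    · have hg : (List.replicate (a+1) "?" ++ c :: t).getD (a + 1) "" = c := by
        rw [List.getD_append_right _ _ _ _ (by simp)]; simp
      have hset : ((List.replicate (a+1) "?" ++ c :: t).set a c) =
          List.replicate a "?" ++ c :: c :: t := by
        rw [List.set_append]
        simp [List.replicate_succ' (n := a)]
      rw [hg]
      simp only [Nat.add_sub_cancel]
      rw [hset]
      rw [ih (c :: t)]
      simp [List.replicate_succ' (n := a)]
    · constructor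
      · omega
      · simp only [Nat.add_sub_cancel]
        rw [List.getD_append _ _ _ _ (by simp)]
        simp

theorem stepA_skip (r : List String) (idx : Nat) (h : r.getD idx "" ≠ "?") : stepA r idx = r := by
  unfold stepA
  split_ifs with h1 h2 h2 <;> simp_all

theorem stepA_fire1 (r : List String) (idx : Nat)
    (h1 : 0 < idx) (h2 : r.getD idx "" = "?") (h3 : r.getD (idx - 1) "" ≠ "?")
    (h4 : (copyRightA r (idx - 1)).getD idx "" ≠ "?") :
    stepA r idx = copyRightA r (idx - 1) := by
  unfold stepA
  simp only [if_pos (show (0 < idx ∧ r.getD idx "" = "?" ∧ r.getD (idx - 1) "" ≠ "?") from ⟨h1, h2, h3⟩)]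
  exact if_neg (fun hx => h4 hx.2.1)

theorem L_skip (n : Nat) (r : List String) (a : Nat)
    (h : ∀ j, a ≤ j → j < a + n → r.getD j "" ≠ "?") :
    (List.range' a n).foldl stepA r = r := by
  induction n generalizing a with
  | zero => rfl
  | succ n ih =>
    rw [List.range'_succ, List.foldl_cons, stepA_skip r a (h a (le_refl _) (by omega))]
    exact ih (a+1) (fun j h1 h2 => h j (by omega) (by omega))

theorem leadQ_split (w : List String) :
    ∃ a rest, w = List.replicate a "?" ++ rest ∧ (rest = [] ∨ ∃ c t, rest = c :: t ∧ c ≠ "?") := by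
  induction w with
  | nil => exact ⟨0, [], by simp, Or.inl rfl⟩
  | cons x w ih =>
    by_cases hx : x = "?"
    · obtain ⟨a, rest, hw, hr⟩ := ih
      exact ⟨a + 1, rest, by simp [hx, hw, List.replicate_succ], hr⟩
    · exact ⟨0, x :: w, by simp, Or.inr ⟨x, w, rfl, hx⟩⟩

theorem fwdGo_rep (k : Nat) (z : List String) (c : String) :
    fwdGo (some c) (List.replicate k "?" ++ z) = List.replicate k c ++ fwdGo (some c) z := by
  induction k with
  | zero => simp
  | succ k ih => simp [List.replicate_succ, fwdGo, ih]

theorem getD_mid (u v : List String) (c : String) : (u ++ c :: v).getD u.length "" = c := by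
  rw [List.getD_append_right _ _ _ _ le_rfl]; simp

theorem getD_mid1 (u v : List String) (c : String) :
    (u ++ c :: v).getD (u.length + 1) "" = v.getD 0 "" := by
  rw [List.getD_append_right _ _ _ _ (by omega)]
  simp [List.getD]

theorem L_main (n : Nat) : ∀ (u t : List String) (c : String), c ≠ "?" → n = t.length →
    (List.range' (u.length + 1) n).foldl stepA (u ++ c :: t) = u ++ c :: fwdGo (some c) t := by
  induction n using Nat.strong_induction_on with
  | _ n ih =>
  intro u t c hc hn
  obtain ⟨k, t', ht, hr⟩ := leadQ_split t
  subst hn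
  rcases k with _ | j
  · simp only [List.replicate, List.nil_append] at ht
    subst ht
    rcases hr with rfl | ⟨y, t₃, rfl, hy⟩
    · rfl
    · simp only [List.length_cons]
      rw [List.range'_succ, List.foldl_cons]
      rw [stepA_skip _ _ (by rw [getD_mid1]; simp [List.getD, hy])]
      have h2 := ih t₃.length (by simp) (u ++ [c]) t₃ y hy rfl
      simp only [List.length_append, List.length_cons, List.length_nil] at h2
      have : u ++ [c] ++ y :: t₃ = u ++ c :: y :: t₃ := by simp
      rw [this] at h2
      have hstart : u.length + 1 + 1 = u.length + 2 := by omega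
      rw [hstart] at h2
      rw [h2]
      simp [fwdGo, hy]
  · subst ht
    have hr' : t' = [] ∨ t'.getD 0 "" ≠ "?" := by
      rcases hr with h | ⟨c', t'', he, hy⟩
      · exact Or.inl h
      · right; subst he; simpa [List.getD] using hy
    simp only [List.length_append, List.length_replicate, List.length_cons]
    rw [show j + 1 + t'.length = (j + t'.length) + 1 by omega]
    rw [List.range'_succ, List.foldl_cons]
    -- the first iteration: copyRightA fires, filling the whole run with c
    have hga : (u ++ c :: (List.replicate (j+1) "?" ++ t')).getD (u.length + 1) "" = "?" := by
      rw [getD_mid1]; simp [List.getD]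
    have hgb : (u ++ c :: (List.replicate (j+1) "?" ++ t')).getD (u.length + 1 - 1) "" ≠ "?" := by
      simp only [Nat.add_sub_cancel]; rw [getD_mid]; exact hc
    have hcr : copyRightA (u ++ c :: (List.replicate (j+1) "?" ++ t')) (u.length + 1 - 1)
        = u ++ c :: (List.replicate (j+1) c ++ t') := by
      simp only [Nat.add_sub_cancel]
      rw [show u ++ c :: (List.replicate (j+1) "?" ++ t') = u ++ c :: List.replicate (j+1) "?" ++ t' by simp]
      rw [copyRight_run (j+1) u t' c hc hr']
      simp
    have hstep : stepA (u ++ c :: (List.replicate (j+1) "?" ++ t')) (u.length + 1)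
        = u ++ c :: (List.replicate (j+1) c ++ t') := by
      rw [stepA_fire1 _ _ (by omega) hga hgb (by rw [hcr, getD_mid1]; simp [List.getD, hc]), hcr]
    rw [hstep]
    -- skip the j filled cells, then continue with ih after the last c
    have hsplit : List.range' (u.length + 1 + 1) (j + t'.length)
        = List.range' (u.length + 2) j ++ List.range' (u.length + 2 + j) t'.length := by
      rw [show u.length + 1 + 1 = u.length + 2 by omega, ← List.range'_append]
      simp [Nat.one_mul]
    rw [hsplit, List.foldl_append]
    rw [L_skip j _ (u.length + 2) (by
      intro i h1 h2
      have e1 : u ++ c :: (List.replicate (j+1) c ++ t') = (u ++ List.replicate (j+2) c) ++ t' := by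
        simp [List.replicate_succ]
      rw [e1, List.getD_append _ _ _ _ (by simp; omega),
          List.getD_append_right _ _ _ _ (by omega),
          List.getD_replicate c (by omega)]
      exact hc)]
    have h2 := ih t'.length (by simp) (u ++ c :: List.replicate j c) t' c hc rfl
    simp only [List.length_append, List.length_cons, List.length_replicate] at h2
    have he1 : u ++ c :: List.replicate j c ++ c :: t' = u ++ c :: (List.replicate (j+1) c ++ t') := by
      simp [List.replicate_succ' (n := j)]
    rw [he1] at h2
    have he2 : u.length + (j + 1) + 1 = u.length + 2 + j := by omega
    rw [he2] at h2
    rw [h2]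
    rw [fwdGo_rep]
    simp [List.replicate_succ' (n := j)]

theorem stepA_leadq (z : List String) (idx a : Nat) (h : idx + 1 < a) :
    stepA (List.replicate a "?" ++ z) idx = List.replicate a "?" ++ z := by
  have hq : ∀ j, j < a → (List.replicate a "?" ++ z).getD j "" = "?" := by
    intro j hj
    rw [List.getD_append _ _ _ _ (by simp [hj]), List.getD_replicate _ hj]
  unfold stepA
  simp only [if_neg (show ¬(0 < idx ∧ (List.replicate a "?" ++ z).getD idx "" = "?" ∧
      (List.replicate a "?" ++ z).getD (idx - 1) "" ≠ "?") from
    fun ⟨_, _, hb⟩ => hb (hq _ (by omega)))]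
  exact if_neg (fun ⟨_, _, hb⟩ => hb (hq _ (by omega)))

theorem L_leadq (n : Nat) : ∀ (s a : Nat) (z : List String), s + n + 1 ≤ a →
    (List.range' s n).foldl stepA (List.replicate a "?" ++ z) = List.replicate a "?" ++ z := by
  induction n with
  | zero => intro s a z _; rfl
  | succ n ih =>
    intro s a z h
    rw [List.range'_succ, List.foldl_cons, stepA_leadq _ _ _ (by omega)]
    exact ih (s+1) a z (by omega)

-- the iteration at the end of the leading run: copy_character_left fires

theorem stepA_leadfire (a' : Nat) (t : List String) (c : String) (hc : c ≠ "?") :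
    stepA (List.replicate (a' + 1) "?" ++ c :: t) a'
      = List.replicate (a' + 1) c ++ c :: t := by
  have hq : ∀ j, j < a' + 1 → (List.replicate (a'+1) "?" ++ c :: t).getD j "" = "?" := by
    intro j hj
    rw [List.getD_append _ _ _ _ (by simp [hj]), List.getD_replicate _ hj]
  unfold stepA
  simp only [if_neg (show ¬(0 < a' ∧ (List.replicate (a'+1) "?" ++ c :: t).getD a' "" = "?" ∧
      (List.replicate (a'+1) "?" ++ c :: t).getD (a' - 1) "" ≠ "?") from
    fun ⟨_, _, hb⟩ => hb (hq _ (by omega)))]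
  have hgc : (List.replicate (a'+1) "?" ++ c :: t).getD (a' + 1) "" = c := by
    have := getD_mid (List.replicate (a'+1) "?") t c
    simpa using this
  rw [if_pos ⟨by simp; omega, hq _ (by omega), by rw [hgc]; exact hc⟩]
  exact copyLeft_run (a'+1) t c hc

-- stepA on an all-'?' row does nothing

theorem stepA_allq (m idx : Nat) : stepA (List.replicate m "?") idx = List.replicate m "?" := by
  by_cases h : idx < m
  · have hq : ∀ j, j < m → (List.replicate m ("?":String)).getD j "" = "?" := by
      intro j hj; rw [List.getD_replicate _ hj]
    unfold stepA
    simp only [if_neg (show ¬(0 < idx ∧ (List.replicate m ("?":String)).getD idx "" = "?" ∧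
        (List.replicate m ("?":String)).getD (idx - 1) "" ≠ "?") from
      fun ⟨_, _, hb⟩ => hb (hq _ (by omega)))]
    refine if_neg (fun ⟨ha, _, hb⟩ => hb (hq _ ?_))
    simp at ha; omega
  · exact stepA_skip _ _ (by rw [List.getD_eq_default _ _ (by simp; omega)]; simp)

-- fwdGo/bwdGo facts

theorem fwd_none_rep (a : Nat) : fwdGo none (List.replicate a "?") = List.replicate a "?" := by
  induction a with
  | zero => rfl
  | succ a ih => simp [List.replicate_succ, fwdGo, ih]

theorem bwd_none_rep (a : Nat) : bwdGo none (List.replicate a "?") = List.replicate a "?" := by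
  induction a with
  | zero => rfl
  | succ a ih => simp [List.replicate_succ, bwdGo, ih]

theorem bwd_some_rep (a : Nat) (c : String) (hc : c ≠ "?") :
    bwdGo (some c) (List.replicate a "?") = List.replicate a c := by
  induction a with
  | zero => rfl
  | succ a ih => simp [List.replicate_succ, bwdGo, ih]

theorem fwd_none_lead (a : Nat) (t : List String) (c : String) (hc : c ≠ "?") :
    fwdGo none (List.replicate a "?" ++ c :: t)
      = List.replicate a "?" ++ c :: fwdGo (some c) t := by
  induction a with
  | zero => simp [fwdGo, hc]
  | succ a ih => simp [List.replicate_succ, fwdGo, ih]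

theorem fwd_noq (t : List String) (c : String) (hc : c ≠ "?") :
    ∀ x ∈ fwdGo (some c) t, x ≠ "?" := by
  induction t generalizing c with
  | nil => simp [fwdGo]
  | cons ch t ih =>
    intro x hx
    by_cases h : ch = "?"
    · simp [fwdGo, h] at hx
      rcases hx with rfl | hx
      · exact hc
      · exact ih c hc x hx
    · simp [fwdGo, h] at hx
      rcases hx with rfl | hx
      · exact h
      · exact ih ch h x hx

theorem bwd_chain (l : List String) (nxt : Option String) (c : String) (z : List String)
    (hl : ∀ x ∈ l, x ≠ "?") (hc : c ≠ "?") :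
    bwdGo nxt (l ++ c :: z) = l ++ c :: bwdGo (some c) z := by
  induction l generalizing nxt with
  | nil => simp [bwdGo, hc]
  | cons x l ih =>
    have hx : x ≠ "?" := hl x (by simp)
    simp only [List.cons_append, bwdGo, if_pos hx]
    rw [ih (some x) (fun y hy => hl y (by simp [hy]))]

theorem fillB_allq (a : Nat) : fillB (List.replicate a "?") = List.replicate a "?" := by
  unfold fillB
  rw [fwd_none_rep, List.reverse_replicate, bwd_none_rep, List.reverse_replicate]

theorem fillB_lead (a : Nat) (t : List String) (c : String) (hc : c ≠ "?") :
    fillB (List.replicate a "?" ++ c :: t)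
      = List.replicate a c ++ c :: fwdGo (some c) t := by
  unfold fillB
  rw [fwd_none_lead a t c hc]
  have hrev : (List.replicate a "?" ++ c :: fwdGo (some c) t).reverse
      = (fwdGo (some c) t).reverse ++ c :: List.replicate a "?" := by
    simp [List.reverse_append, List.reverse_replicate]
  rw [hrev, bwd_chain _ none c _ (by
      intro x hx; exact fwd_noq t c hc x (List.mem_reverse.mp hx)) hc]
  rw [bwd_some_rep a c hc]
  simp [List.reverse_append, List.reverse_replicate]

theorem rowPass_eq (w : List String) : rowPassA w = fillB w := by
  obtain ⟨a, rest, hw, hr⟩ := leadQ_split w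
  subst hw
  rcases hr with rfl | ⟨c, t, rfl, hc⟩
  · -- all-'?' row: nothing ever fires
    simp only [List.append_nil]
    rw [fillB_allq]
    unfold rowPassA
    generalize List.range _ = L
    induction L with
    | nil => rfl
    | cons i L ih => rw [List.foldl_cons, stepA_allq]; exact ih
  · rw [fillB_lead a t c hc]
    unfold rowPassA
    rw [List.range_eq_range']
    cases a with
    | zero =>
      simp only [List.replicate, List.nil_append, List.length_cons]
      rw [List.range'_succ, List.foldl_cons]
      rw [stepA_skip _ _ (by simpa [List.getD] using hc)]
      have := L_main t.length [] t c hc rfl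
      simpa using this
    | succ a' =>
      have hlen : (List.replicate (a'+1) "?" ++ c :: t).length = a' + 1 + 1 + t.length := by
        simp; omega
      rw [hlen]
      have h3 := @List.range'_append (a'+1) 1 t.length 1
      have h2 := @List.range'_append a' 1 (1 + t.length) 1
      have h1 := @List.range'_append 0 a' (1 + (1 + t.length)) 1
      simp only [Nat.one_mul, Nat.zero_add] at h1 h2 h3
      have hsplit : List.range' 0 (a' + 1 + 1 + t.length)
          = List.range' 0 a' ++ (List.range' a' 1 ++ (List.range' (a'+1) 1
            ++ List.range' (a'+2) t.length)) := by
        rw [show a' + 2 = a' + 1 + 1 by omega, h3, h2, h1]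
        congr 1
        omega
      rw [hsplit, List.foldl_append, List.foldl_append, List.foldl_append]
      rw [L_leadq a' 0 (a'+1) (c :: t) (by omega)]
      simp only [List.range'_one, List.foldl_cons, List.foldl_nil]
      rw [stepA_leadfire a' t c hc]
      rw [stepA_skip _ _ (by
        have := getD_mid (List.replicate (a'+1) c) t c
        simp only [List.length_replicate] at this
        rw [this]; exact hc)]
      have := L_main t.length (List.replicate (a'+1) c) t c hc rfl
      simp only [List.length_replicate] at this
      rw [show a' + 2 = a' + 1 + 1 by omega]
      exact this

-- ===== VERDICT (by name: the statement is the Claim_ definition above) =====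
theorem complete_cake_spec : Claim_equal_complete_cake := by
  intro cake _
  unfold Spec_complete_cake complete_cake complete_cake_alt
  simp [List.range_succ, funext rowPass_eq]
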